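-- pv_equiv track=rewrite | github.com/ase2026participant/ASE-2026 | Assertion-Utility/SSA-Variable_Gen/ssa_analyzer/ssa_analyzer/derived_naming.py | detect_ternary
-- ===== SOURCE A (Python) =====
-- def detect_ternary(expr: str) -> bool:
--     """
--     Detect if expression contains a ternary operator.
--
--     Args:
--         expr: Expression string
--
--     Returns:
--         True if ternary operator found
--     """
--     # Simple detection: look for ? : pattern (respecting parentheses)
--     depth = 0
--     found_q = False
--     for i, char in enumerate(expr):
--         if char == '(':
--             depth += 1
--         elif char == ')':
--             depth -= 1
--         elif char == '?' and depth == 0: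
--             found_q = True
--         elif char == ':' and depth == 0 and found_q:
--             return True
--     return False
-- ===== SOURCE B (Python) =====
-- def detect_ternary(expr: str) -> bool:
--     """
--     Detect if expression contains a ternary operator.
--
--     Alternative decomposition: first build the ordered list of depth-0
--     '?' / ':' markers, then answer by searching that list.
--     """
--     depth = 0
--     tokens = []
--     for char in expr:
--         if char == '(':
--             depth += 1
--         elif char == ')':
--             depth -= 1
--         elif (char == '?' or char == ':') and depth == 0:
--             tokens.append(char)
--     if '?' not in tokens:
--         return False
--     return ':' in tokens[tokens.index('?') + 1:]
-- ===== Notes on version B (the rewrite author's own statement) =====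
-- stated objective: alternative
-- what changed: The early-returning scan-with-flag is replaced by a two-phase decomposition: one pass collects the ordered list of depth-zero question-mark and colon markers, then the answer is whether a colon occurs after the first question mark in that list.
import Mathlib
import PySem

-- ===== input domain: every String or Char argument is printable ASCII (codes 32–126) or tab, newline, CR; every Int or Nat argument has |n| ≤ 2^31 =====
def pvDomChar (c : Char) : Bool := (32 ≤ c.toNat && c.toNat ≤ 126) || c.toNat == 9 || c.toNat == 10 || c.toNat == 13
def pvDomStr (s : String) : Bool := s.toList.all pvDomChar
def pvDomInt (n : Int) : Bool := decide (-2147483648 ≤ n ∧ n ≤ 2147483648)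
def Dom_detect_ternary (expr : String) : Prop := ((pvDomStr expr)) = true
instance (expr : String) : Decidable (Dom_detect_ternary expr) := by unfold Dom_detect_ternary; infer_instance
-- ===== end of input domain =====

-- B replaces A's early-returning scan-with-flag by a two-phase decomposition:
-- collect the depth-zero marker list, then search that list (alternative, same cost).


-- ===== PORT A =====
-- A's loop: depth counter, found_q flag, early return True on a qualifying ':'.
def aLoop : List Char → Int → Bool → Bool
  | [], _, _ => false
  | c :: cs, depth, foundQ =>
    if c = '(' then aLoop cs (depth + 1) foundQ
    else if c = ')' then aLoop cs (depth - 1) foundQ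
    else if c = '?' ∧ depth = 0 then aLoop cs depth true
    else if c = ':' ∧ depth = 0 ∧ foundQ = true then true
    else aLoop cs depth foundQ

def detect_ternary (expr : String) : Bool := aLoop expr.toList 0 false

-- ===== PORT B =====
-- B phase 1: the ordered list of depth-zero markers.
def altTokens : List Char → Int → List Char
  | [], _ => []
  | c :: cs, depth =>
    if c = '(' then altTokens cs (depth + 1)
    else if c = ')' then altTokens cs (depth - 1)
    else if (c = '?' ∨ c = ':') ∧ depth = 0 then c :: altTokens cs depth
    else altTokens cs depth

-- B phase 2: is there a ':' after the first '?' in the token list?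
def detect_ternary_alt (expr : String) : Bool :=
  let tokens := altTokens expr.toList 0
  match PySem.List.index? tokens '?' with
  | none => false
  | some i => (tokens.drop (i + 1)).contains ':'

-- ===== PRECONDITION & SPEC =====
def Spec_detect_ternary (expr : String) (out : Bool) : Prop := out = detect_ternary_alt expr
instance (expr : String) (out : Bool) : Decidable (Spec_detect_ternary expr out) := by unfold Spec_detect_ternary; infer_instance

-- ===== CLAIM (what is proved, stated in full; the proofs are below) =====
def Claim_equal_detect_ternary : Prop := ∀ (expr : String), Dom_detect_ternary expr → Spec_detect_ternary expr (detect_ternary expr)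

-- ===== LEMMAS AND PROOFS =====

-- the abstract check A performs, expressed on the token list
def checkTokens : List Char → Bool → Bool
  | [], _ => false
  | t :: ts, foundQ =>
    if t = ':' ∧ foundQ = true then true
    else checkTokens ts (foundQ || t == '?')

lemma altTokens_mem : ∀ (cs : List Char) (d : Int) (c : Char),
    c ∈ altTokens cs d → c = '?' ∨ c = ':' := by
  intro cs
  induction cs with
  | nil => intro d c h; simp [altTokens] at h
  | cons x xs ih =>
    intro d c h
    simp only [altTokens] at h
    split_ifs at h with h1 h2 h3
    · exact ih _ _ h
    · exact ih _ _ h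
    · rcases List.mem_cons.mp h with h | h
      · subst h; exact h3.1
      · exact ih _ _ h
    · exact ih _ _ h

lemma aLoop_eq_check : ∀ (cs : List Char) (d : Int) (fq : Bool),
    aLoop cs d fq = checkTokens (altTokens cs d) fq := by
  intro cs
  induction cs with
  | nil => intro d fq; simp [aLoop, altTokens, checkTokens]
  | cons x xs ih =>
    intro d fq
    by_cases h1 : x = '('
    · simp [aLoop, altTokens, h1, ih]
    by_cases h2 : x = ')'
    · simp [aLoop, altTokens, h2, ih]
    by_cases hd : d = 0
    · by_cases hq : x = '?'
      · simp [aLoop, altTokens, hd, hq, checkTokens, ih]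
      by_cases hc : x = ':'
      · cases fq with
        | false => simp [aLoop, altTokens, hd, hc, checkTokens, ih]
        | true => simp [aLoop, altTokens, hd, hc, checkTokens]
      · simp [aLoop, altTokens, h1, h2, hd, hq, hc, ih]
    · simp [aLoop, altTokens, h1, h2, hd, ih]

lemma check_true_eq_contains : ∀ (ts : List Char),
    (∀ c ∈ ts, c = '?' ∨ c = ':') → checkTokens ts true = ts.contains ':' := by
  intro ts
  induction ts with
  | nil => intro _; simp [checkTokens]
  | cons t ts ih =>
    intro h
    rcases h t (List.mem_cons_self) with ht | ht
    · subst ht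
      simp [checkTokens, ih (fun c hc => h c (List.mem_cons_of_mem _ hc))]
    · subst ht; simp [checkTokens]

lemma check_false_eq_index : ∀ (ts : List Char),
    (∀ c ∈ ts, c = '?' ∨ c = ':') →
    checkTokens ts false =
      (match PySem.List.index? ts '?' with
       | none => false
       | some i => (ts.drop (i + 1)).contains ':') := by
  intro ts
  induction ts with
  | nil => intro _; simp [checkTokens, PySem.List.index?_eq_idxOf?]
  | cons t ts ih =>
    intro h
    have hrest : ∀ c ∈ ts, c = '?' ∨ c = ':' :=
      fun c hc => h c (List.mem_cons_of_mem _ hc)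
    rcases h t (List.mem_cons_self) with ht | ht
    · subst ht
      rw [PySem.List.index?_cons_self]
      simp [checkTokens, check_true_eq_contains ts hrest]
    · subst ht
      rw [PySem.List.index?_cons_of_ne ts (by decide : (':' : Char) ≠ '?')]
      have hcb : ((':' : Char) == '?') = false := by decide
      simp only [checkTokens, hcb, Bool.false_eq_true, and_false, if_false, Bool.false_or]
      rw [ih hrest]
      cases hix : PySem.List.index? ts '?' with
      | none => simp
      | some i => simp [List.drop_succ_cons]
  
theorem detect_ternary_spec : Claim_equal_detect_ternary := by
  intro expr _
  unfold Spec_detect_ternary detect_ternary detect_ternary_alt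
  rw [aLoop_eq_check]
  exact check_false_eq_index _ (altTokens_mem _ _)
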